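-- pv_equiv track=rewrite | github.com/fox-it/dissect.hypervisor | dissect/hypervisor/backup/vma.py | _iter_mask
-- ===== SOURCE A (Python) =====
-- def _iter_mask(mask, length):
--     # Yield consecutive bitmask values
--     current_status = mask & 1
--     current_count = 0
--
--     for bit_idx in range(length):
--         status = (mask & (1 << bit_idx)) >> bit_idx
--         if status == current_status:
--             current_count += 1
--         else:
--             yield current_status, current_count
--             current_status = status
--             current_count = 1
--
--     if current_count:
--         yield current_status, current_count
-- ===== SOURCE B (Python) =====
-- def _rle(bits):
--     # Recursive run-length encoding of an explicit list
--     if not bits: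
--         return []
--     head = bits[0]
--     n = 1
--     while n < len(bits) and bits[n] == head:
--         n += 1
--     return [(head, n)] + _rle(bits[n:])
--
--
-- def _iter_mask(mask, length):
--     # Build the bit sequence explicitly, then run-length encode it
--     bits = [(mask & (1 << i)) >> i for i in range(length)]
--     yield from _rle(bits)
-- ===== Notes on version B (the rewrite author's own statement) =====
-- stated objective: alternative
-- what changed: Replaces A's single-pass current_status/current_count state machine with end-of-loop flush by an explicit bit list plus a recursive run-length encoder that consumes one whole run per step.
import Mathlib
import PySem

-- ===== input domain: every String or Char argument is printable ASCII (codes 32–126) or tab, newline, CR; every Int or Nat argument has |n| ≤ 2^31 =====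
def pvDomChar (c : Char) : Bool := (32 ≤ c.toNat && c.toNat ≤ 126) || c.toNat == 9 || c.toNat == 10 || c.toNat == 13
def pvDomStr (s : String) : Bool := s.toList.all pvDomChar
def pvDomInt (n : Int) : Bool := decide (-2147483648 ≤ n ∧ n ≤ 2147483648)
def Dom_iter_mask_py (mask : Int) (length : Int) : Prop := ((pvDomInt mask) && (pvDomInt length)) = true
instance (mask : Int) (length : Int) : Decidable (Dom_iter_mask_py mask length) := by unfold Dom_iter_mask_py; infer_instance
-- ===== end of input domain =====

-- B replaces A's running current_status/current_count state machine (with its end-of-loop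
-- flush) by an explicit bit list plus a recursive run-length encoder that consumes one whole
-- run per step ("alternative" objective; both are generators, equivalence is about the
-- yielded sequence as a list).

-- ===== PORT A =====
-- status = (mask & (1 << bit_idx)) >> bit_idx; bit_idx ∈ range(length) is ≥ 0, so '.toNat' is
-- exact; PySem.Int.band and core <<< / >>> (by a Nat) are Python-exact (two's complement,
-- flooring shift).
def iter_mask_py (mask : Int) (length : Int) : List (Int × Int) :=
  let s := (PySem.List.pyRange 0 length 1).foldl
    (fun (acc : List (Int × Int) × Int × Int) bit_idx =>
      let status := (PySem.Int.band mask ((1 : Int) <<< (bit_idx.toNat : Nat))) >>> (bit_idx.toNat : Nat)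
      if status = acc.2.1 then (acc.1, acc.2.1, acc.2.2 + 1)
      else (acc.1 ++ [(acc.2.1, acc.2.2)], status, 1))
    ([], PySem.Int.band mask 1, 0)
  if s.2.2 ≠ 0 then s.1 ++ [(s.2.1, s.2.2)] else s.1

-- ===== PORT B =====
-- the 'while n < len(bits) and bits[n] == head' scan of Source B: number of leading elements of
-- the tail equal to head (a count, hence Nat; Source B's n is 1 + this count, bits[n:] drops it)
def pvRunLen (head : Int) : List Int → Nat
  | [] => 0
  | x :: xs => if x = head then 1 + pvRunLen head xs else 0

lemma pvRunLen_le (head : Int) (xs : List Int) : pvRunLen head xs ≤ xs.length := by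
  induction xs with
  | nil => simp [pvRunLen]
  | cons x xs ih => simp only [pvRunLen]; split <;> simp; omega

-- _rle(bits) = [(head, n)] + _rle(bits[n:])
def pvRle : List Int → List (Int × Int)
  | [] => []
  | head :: rest =>
    let k := pvRunLen head rest
    (head, 1 + (k : Int)) :: pvRle (rest.drop k)
termination_by bits => bits.length
decreasing_by
  have := pvRunLen_le head rest
  simp [List.length_drop]

def iter_mask_py_alt (mask : Int) (length : Int) : List (Int × Int) :=
  pvRle ((PySem.List.pyRange 0 length 1).map
    (fun i => (PySem.Int.band mask ((1 : Int) <<< (i.toNat : Nat))) >>> (i.toNat : Nat)))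

-- ===== PRECONDITION & SPEC =====
def Spec_iter_mask_py (mask : Int) (length : Int) (out : List (Int × Int)) : Prop := out = iter_mask_py_alt mask length
instance (mask : Int) (length : Int) (out : List (Int × Int)) : Decidable (Spec_iter_mask_py mask length out) := by unfold Spec_iter_mask_py; infer_instance

-- ===== CLAIM (what is proved, stated in full; the proofs are below) =====
def Claim_equal_iter_mask_py : Prop := ∀ (mask : Int) (length : Int), Dom_iter_mask_py mask length → Spec_iter_mask_py mask length (iter_mask_py mask length)

-- ===== LEMMAS AND PROOFS =====

-- A's loop body, abstracted over the already-computed status value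
def pvAStep (acc : List (Int × Int) × Int × Int) (status : Int) : List (Int × Int) × Int × Int :=
  if status = acc.2.1 then (acc.1, acc.2.1, acc.2.2 + 1)
  else (acc.1 ++ [(acc.2.1, acc.2.2)], status, 1)

-- A's whole computation (fold + final flush) as a structural recursion over the status list
def pvAFold (out : List (Int × Int)) (cs cc : Int) : List Int → List (Int × Int)
  | [] => if cc ≠ 0 then out ++ [(cs, cc)] else out
  | s :: L => if s = cs then pvAFold out cs (cc + 1) L else pvAFold (out ++ [(cs, cc)]) s 1 L

lemma foldl_flush_eq_pvAFold (L : List Int) (out : List (Int × Int)) (cs cc : Int) :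
    (let s := L.foldl pvAStep (out, cs, cc);
     if s.2.2 ≠ 0 then s.1 ++ [(s.2.1, s.2.2)] else s.1) = pvAFold out cs cc L := by
  induction L generalizing out cs cc with
  | nil => simp [pvAFold]
  | cons s L ih =>
    simp only [List.foldl_cons, pvAFold]
    by_cases h : s = cs
    · rw [← ih out cs (cc + 1)]; simp [pvAStep, h]
    · rw [← ih (out ++ [(cs, cc)]) s 1]; simp [pvAStep, h]

lemma pvAFold_merge (L : List Int) (out : List (Int × Int)) (cs cc : Int) (h : 1 ≤ cc) :
    pvAFold out cs cc L
      = out ++ (cs, cc + (pvRunLen cs L : Int)) :: pvRle (L.drop (pvRunLen cs L)) := by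
  induction L generalizing out cs cc with
  | nil =>
    have hcc : cc ≠ 0 := by omega
    simp [pvAFold, pvRunLen, pvRle, hcc]
  | cons s L ih =>
    by_cases hs : s = cs
    · subst hs
      simp only [pvAFold, pvRunLen, if_true]
      rw [ih out s (cc + 1) (by omega)]
      congr 3
      · push_cast; ring
      · rw [Nat.add_comm, List.drop_succ_cons]
    · simp only [pvAFold, pvRunLen, if_neg hs]
      rw [ih (out ++ [(cs, cc)]) s 1 (le_refl 1)]
      simp [pvRle]

lemma pvAFold_eq_pvRle (L : List Int) (b : Int) (hb : ∀ x ∈ L.head?, x = b) :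
    pvAFold [] b 0 L = pvRle L := by
  cases L with
  | nil => simp [pvAFold, pvRle]
  | cons x L =>
    have hx : x = b := hb x (by simp)
    subst hx
    have h1 : pvAFold [] x 0 (x :: L) = pvAFold [] x 1 L := by simp [pvAFold]
    rw [h1, pvAFold_merge L [] x 1 (le_refl 1)]
    simp [pvRle]

-- ===== VERDICT (by name: the statement is the Claim_ definition above) =====
theorem iter_mask_py_spec : Claim_equal_iter_mask_py := by
  intro mask length _
  show iter_mask_py mask length = iter_mask_py_alt mask length
  have h := foldl_flush_eq_pvAFold
    ((PySem.List.pyRange 0 length 1).map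
      (fun i => (PySem.Int.band mask ((1 : Int) <<< (i.toNat : Nat))) >>> (i.toNat : Nat)))
    [] (PySem.Int.band mask 1) 0
  simp only [List.foldl_map] at h
  refine h.trans (pvAFold_eq_pvRle _ _ ?_)
  intro x hx
  by_cases hl : 0 < length
  · rw [PySem.List.pyRange_one_cons hl] at hx
    simp at hx
    rw [hx]
  · rw [PySem.List.pyRange_one_eq_nil (by omega)] at hx
    simp at hx
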